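-- pv_equiv track=rewrite | github.com/artamonovkirill/adventofcode | 2024/12/d12.py | price2
-- ===== SOURCE A (Python) =====
-- def price2(plot, values):
--     area = len(plot)
--     vertices = 0
--     for x, y in plot:
--         value = values[y][x]
--         left = values[y][x - 1] if x - 1 in values[y] else '.'
--         right = values[y][x + 1] if x + 1 in values[y] else '.'
--         up = values[y - 1][x] if y - 1 in values else '.'
--         down = values[y + 1][x] if y + 1 in values else '.'
--
--         left_up = values[y - 1][x - 1] if y - 1 in values and x - 1 in values[y - 1] else '.'
--         if left_up != value and up == value and left == value:
--             # inverted left-up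
--             vertices += 1
--         if up != value and left != value:
--             # left-up
--             vertices += 1
--
--         left_down = values[y + 1][x - 1] if y + 1 in values and x - 1 in values[y + 1] else '.'
--         if left_down != value and down == value and left == value:
--             # inverted left-down
--             vertices += 1
--         if down != value and left != value:
--             # left-down
--             vertices += 1
--
--         right_up = values[y - 1][x + 1] if y - 1 in values and x + 1 in values[y - 1] else '.'
--         if right_up != value and up == value and right == value:
--             # inverted right-up
--             vertices += 1
--         if up != value and right != value:
--             # right-up
--             vertices += 1
--
--         right_down = values[y + 1][x + 1] if y + 1 in values and x + 1 in values[y + 1] else '.'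
--         if right_down != value and down == value and right == value:
--             # inverted right-down
--             vertices += 1
--         if down != value and right != value:
--             # right-down
--             vertices += 1
--
--     return area * vertices
-- ===== SOURCE B (Python) =====
-- def price2(plot, values):
--     # pass 0: index the region's cells with their values
--     cells = {}
--     for x, y in plot:
--         cells[(x, y)] = values[y][x]
--     # pass 1: collect the set of boundary edges (cell, outward direction)
--     edges = set()
--     for (x, y), v in cells.items():
--         for dx, dy in ((0, -1), (1, 0), (0, 1), (-1, 0)):
--             if values.get(y + dy, {}).get(x + dx, '.') != v:
--                 edges.add((x, y, dx, dy))
--     # pass 2: an edge starts a side iff the preceding cell along the side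
--     # (one step in the perpendicular direction) does not carry the same edge
--     sides = 0
--     for x, y, dx, dy in edges:
--         px, py = dy, -dx
--         p = (x + px, y + py)
--         if p not in cells or cells[p] != cells[(x, y)] or (x + px, y + py, dx, dy) not in edges:
--             sides += 1
--     return len(plot) * sides
-- ===== Notes on version B (the rewrite author's own statement) =====
-- stated objective: alternative
-- what changed: B works in three staged passes over different data structures — index the plot's cells in a dict, build the explicit SET of boundary edges (cell, outward direction), then count side-starts by membership tests in that edge set — instead of A's single per-cell pass with eight inline convex/concave corner tests; side count equals corner count on regions, i.e. duplicate-free plots closed under same-value adjacency, which Pre_ states.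
-- outside the precondition, e.g. on price2([(0, 1)], {0: {0: 'b', 1: 'b'}, 1: {0: 'b', 1: 'a'}}): A returns 2, B returns 3
import Mathlib
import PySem

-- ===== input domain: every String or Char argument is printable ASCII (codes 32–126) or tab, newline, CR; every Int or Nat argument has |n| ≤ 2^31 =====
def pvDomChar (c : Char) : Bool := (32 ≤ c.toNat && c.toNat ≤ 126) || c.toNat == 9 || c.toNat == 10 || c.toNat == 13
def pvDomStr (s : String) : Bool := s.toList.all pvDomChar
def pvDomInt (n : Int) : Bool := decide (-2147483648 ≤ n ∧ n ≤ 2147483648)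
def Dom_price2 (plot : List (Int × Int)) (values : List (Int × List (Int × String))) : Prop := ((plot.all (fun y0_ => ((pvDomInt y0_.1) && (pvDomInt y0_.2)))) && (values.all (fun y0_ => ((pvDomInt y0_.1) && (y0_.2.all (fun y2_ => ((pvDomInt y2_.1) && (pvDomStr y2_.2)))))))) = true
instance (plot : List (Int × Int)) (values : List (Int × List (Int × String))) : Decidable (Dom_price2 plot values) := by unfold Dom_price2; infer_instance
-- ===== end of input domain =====

-- B prices the region in three staged passes — index the cells in a dict, collect the SET of
-- boundary edges, then count the edges that start a side by membership in that set — instead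
-- of A's single pass with eight per-cell corner tests; equal on regions (Pre_: plot is a
-- duplicate-free union of whole same-value components); objective: alternative (same cost).

-- ===== PORT A =====
-- literal transliteration of A's loop: guarded dict lookups, eight ifs in source order
def price2 (plot : List (Int × Int)) (values : List (Int × List (Int × String))) : Int :=
  let area : Int := plot.length
  let vertices : Int := plot.foldl (fun vertices c =>
    let x := c.1
    let y := c.2
    let vd := PySem.Dict.mk values
    let row := (vd.get? y).getD []                                -- values[y]  (Pre_: present)
    let value := ((PySem.Dict.mk row).get? x).getD ""             -- values[y][x]  (Pre_: present)
    let left := if (PySem.Dict.mk row).contains (x - 1) then ((PySem.Dict.mk row).get? (x - 1)).getD "" else "."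
    let right := if (PySem.Dict.mk row).contains (x + 1) then ((PySem.Dict.mk row).get? (x + 1)).getD "" else "."
    let up := if vd.contains (y - 1) then ((PySem.Dict.mk ((vd.get? (y - 1)).getD [])).get? x).getD "" else "."
    let down := if vd.contains (y + 1) then ((PySem.Dict.mk ((vd.get? (y + 1)).getD [])).get? x).getD "" else "."
    let left_up := if vd.contains (y - 1) && (PySem.Dict.mk ((vd.get? (y - 1)).getD [])).contains (x - 1) then ((PySem.Dict.mk ((vd.get? (y - 1)).getD [])).get? (x - 1)).getD "" else "."
    let vertices := vertices + (if left_up ≠ value ∧ up = value ∧ left = value then 1 else 0)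
    let vertices := vertices + (if up ≠ value ∧ left ≠ value then 1 else 0)
    let left_down := if vd.contains (y + 1) && (PySem.Dict.mk ((vd.get? (y + 1)).getD [])).contains (x - 1) then ((PySem.Dict.mk ((vd.get? (y + 1)).getD [])).get? (x - 1)).getD "" else "."
    let vertices := vertices + (if left_down ≠ value ∧ down = value ∧ left = value then 1 else 0)
    let vertices := vertices + (if down ≠ value ∧ left ≠ value then 1 else 0)
    let right_up := if vd.contains (y - 1) && (PySem.Dict.mk ((vd.get? (y - 1)).getD [])).contains (x + 1) then ((PySem.Dict.mk ((vd.get? (y - 1)).getD [])).get? (x + 1)).getD "" else "."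
    let vertices := vertices + (if right_up ≠ value ∧ up = value ∧ right = value then 1 else 0)
    let vertices := vertices + (if up ≠ value ∧ right ≠ value then 1 else 0)
    let right_down := if vd.contains (y + 1) && (PySem.Dict.mk ((vd.get? (y + 1)).getD [])).contains (x + 1) then ((PySem.Dict.mk ((vd.get? (y + 1)).getD [])).get? (x + 1)).getD "" else "."
    let vertices := vertices + (if right_down ≠ value ∧ down = value ∧ right = value then 1 else 0)
    let vertices := vertices + (if down ≠ value ∧ right ≠ value then 1 else 0)
    vertices) 0
  area * vertices

-- ===== PORT B =====
-- B's grid getter values.get(y, {}).get(x, '.')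
def pyGet (values : List (Int × List (Int × String))) (x y : Int) : String :=
  ((PySem.Dict.mk (((PySem.Dict.mk values).get? y).getD [])).get? x).getD "."

-- the tuple of the four orthogonal directions in Source B
def dirs4 : List (Int × Int) := [(0, -1), (1, 0), (0, 1), (-1, 0)]

-- pass 0: cells[(x, y)] = values[y][x]  (Pre_: both keys present)
def cellsOf (plot : List (Int × Int)) (values : List (Int × List (Int × String))) :
    PySem.Dict (Int × Int) String :=
  plot.foldl (fun d c =>
    d.insert (c.1, c.2)
      (((PySem.Dict.mk (((PySem.Dict.mk values).get? c.2).getD [])).get? c.1).getD ""))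
    PySem.Dict.empty

-- pass 1: the set of boundary edges (x, y, dx, dy)
def edgesOf (plot : List (Int × Int)) (values : List (Int × List (Int × String))) :
    PySem.Set (Int × Int × Int × Int) :=
  (cellsOf plot values).items.foldl (fun es p =>
    dirs4.foldl (fun es dr =>
      if pyGet values (p.1.1 + dr.1) (p.1.2 + dr.2) ≠ p.2 then
        PySem.Set.add es (p.1.1, p.1.2, dr.1, dr.2)
      else es) es) PySem.Set.empty

def price2_alt (plot : List (Int × Int)) (values : List (Int × List (Int × String))) : Int :=
  let cells := cellsOf plot values
  let edges := edgesOf plot values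
  -- pass 2: count the edges that start their side
  let sides : Int := edges.foldl (fun s e =>
    let x := e.1
    let y := e.2.1
    let dx := e.2.2.1
    let dy := e.2.2.2
    let px := dy
    let py := -dx
    s + (if cells.contains (x + px, y + py) = false ∨
            cells.getD (x + px, y + py) "" ≠ cells.getD (x, y) "" ∨
            (x + px, y + py, dx, dy) ∉ edges then 1 else 0)) 0
  (plot.length : Int) * sides

-- ===== PRECONDITION & SPEC =====
-- A raises on a plot cell whose row/column key is missing (also in the row above/below);
-- those inputs are excluded.  Beyond that, Pre_ restricts to the function's natural
-- domain — plot is a region: a duplicate-free list closed under same-value orthogonal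
-- adjacency — outside which a plot covers only part of a region and the corner count
-- (A) and the side count (B) are counts of different partial figures.
def gridOK_price2 (values : List (Int × List (Int × String))) (x y : Int) : Prop :=
  (PySem.Dict.mk values).contains y = true ∧
  (PySem.Dict.mk (((PySem.Dict.mk values).get? y).getD [])).contains x = true ∧
  ((PySem.Dict.mk values).contains (y - 1) = true → (PySem.Dict.mk (((PySem.Dict.mk values).get? (y - 1)).getD [])).contains x = true) ∧
  ((PySem.Dict.mk values).contains (y + 1) = true → (PySem.Dict.mk (((PySem.Dict.mk values).get? (y + 1)).getD [])).contains x = true)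

def Pre_price2 (plot : List (Int × Int)) (values : List (Int × List (Int × String))) : Prop :=
  plot.Nodup ∧
  (∀ c ∈ plot, gridOK_price2 values c.1 c.2) ∧
  (∀ c ∈ plot, ∀ d ∈ ([(1, 0), (-1, 0), (0, 1), (0, -1)] : List (Int × Int)),
    pyGet values (c.1 + d.1) (c.2 + d.2) = pyGet values c.1 c.2 → (c.1 + d.1, c.2 + d.2) ∈ plot)

instance (plot : List (Int × Int)) (values : List (Int × List (Int × String))) : Decidable (Pre_price2 plot values) := by
  unfold Pre_price2 gridOK_price2; infer_instance

def pvWitness_price2 : (List (Int × Int)) × (List (Int × List (Int × String))) :=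
  ([(0, 0)], [(0, [(0, "a")])])

def Spec_price2 (plot : List (Int × Int)) (values : List (Int × List (Int × String))) (out : Int) : Prop := out = price2_alt plot values
instance (plot : List (Int × Int)) (values : List (Int × List (Int × String))) (out : Int) : Decidable (Spec_price2 plot values out) := by unfold Spec_price2; infer_instance

-- ===== CLAIM (what is proved, stated in full; the proofs are below) =====
def Claim_equal_price2 : Prop := ∀ (plot : List (Int × Int)) (values : List (Int × List (Int × String))), Dom_price2 plot values → Pre_price2 plot values → Spec_price2 plot values (price2 plot values)

-- ===== LEMMAS AND PROOFS =====

-- the raw stored value values[y][x] as the B port reads it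
def valRaw (values : List (Int × List (Int × String))) (c : Int × Int) : String :=
  ((PySem.Dict.mk (((PySem.Dict.mk values).get? c.2).getD [])).get? c.1).getD ""

-- per-cell indicator of a convex corner of type (dx, dy)
def convI (vals : List (Int × List (Int × String))) (x y dx dy : Int) : Int :=
  if pyGet vals x (y + dy) ≠ pyGet vals x y ∧ pyGet vals (x + dx) y ≠ pyGet vals x y then 1 else 0

-- per-cell indicator of a concave ("inverted") corner of type (dx, dy)
def concI (vals : List (Int × List (Int × String))) (x y dx dy : Int) : Int :=
  if pyGet vals (x + dx) (y + dy) ≠ pyGet vals x y ∧ pyGet vals x (y + dy) = pyGet vals x y ∧ pyGet vals (x + dx) y = pyGet vals x y then 1 else 0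

-- per-cell indicator of a boundary edge with normal n that CONTINUES the edge of the
-- neighbouring cell in direction p (the side does not start here)
def contI (vals : List (Int × List (Int × String))) (x y nx ny px py : Int) : Int :=
  if pyGet vals (x + nx) (y + ny) ≠ pyGet vals x y ∧ pyGet vals (x + px) (y + py) = pyGet vals x y ∧ pyGet vals (x + px + nx) (y + py + ny) = pyGet vals x y then 1 else 0

-- A's loop body, as a named per-cell function (definitionally the foldl body of price2)
def cellA (values : List (Int × List (Int × String))) (c : Int × Int) : Int :=
  let x := c.1
  let y := c.2
  let vd := PySem.Dict.mk values
  let row := (vd.get? y).getD []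
  let value := ((PySem.Dict.mk row).get? x).getD ""
  let left := if (PySem.Dict.mk row).contains (x - 1) then ((PySem.Dict.mk row).get? (x - 1)).getD "" else "."
  let right := if (PySem.Dict.mk row).contains (x + 1) then ((PySem.Dict.mk row).get? (x + 1)).getD "" else "."
  let up := if vd.contains (y - 1) then ((PySem.Dict.mk ((vd.get? (y - 1)).getD [])).get? x).getD "" else "."
  let down := if vd.contains (y + 1) then ((PySem.Dict.mk ((vd.get? (y + 1)).getD [])).get? x).getD "" else "."
  let left_up := if vd.contains (y - 1) && (PySem.Dict.mk ((vd.get? (y - 1)).getD [])).contains (x - 1) then ((PySem.Dict.mk ((vd.get? (y - 1)).getD [])).get? (x - 1)).getD "" else "."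
  let left_down := if vd.contains (y + 1) && (PySem.Dict.mk ((vd.get? (y + 1)).getD [])).contains (x - 1) then ((PySem.Dict.mk ((vd.get? (y + 1)).getD [])).get? (x - 1)).getD "" else "."
  let right_up := if vd.contains (y - 1) && (PySem.Dict.mk ((vd.get? (y - 1)).getD [])).contains (x + 1) then ((PySem.Dict.mk ((vd.get? (y - 1)).getD [])).get? (x + 1)).getD "" else "."
  let right_down := if vd.contains (y + 1) && (PySem.Dict.mk ((vd.get? (y + 1)).getD [])).contains (x + 1) then ((PySem.Dict.mk ((vd.get? (y + 1)).getD [])).get? (x + 1)).getD "" else "."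
  (if left_up ≠ value ∧ up = value ∧ left = value then 1 else 0)
  + (if up ≠ value ∧ left ≠ value then 1 else 0)
  + (if left_down ≠ value ∧ down = value ∧ left = value then 1 else 0)
  + (if down ≠ value ∧ left ≠ value then 1 else 0)
  + (if right_up ≠ value ∧ up = value ∧ right = value then 1 else 0)
  + (if up ≠ value ∧ right ≠ value then 1 else 0)
  + (if right_down ≠ value ∧ down = value ∧ right = value then 1 else 0)
  + (if down ≠ value ∧ right ≠ value then 1 else 0)

-- the per-cell count of side-starts stated over the grid values only
def cellB (values : List (Int × List (Int × String))) (c : Int × Int) : Int :=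
  let x := c.1
  let y := c.2
  let v := pyGet values x y
  (if pyGet values x (y-1) ≠ v ∧ (pyGet values (x-1) y ≠ v ∨ pyGet values (x-1) (y-1) = v) then 1 else 0)
  + (if pyGet values (x+1) y ≠ v ∧ (pyGet values x (y-1) ≠ v ∨ pyGet values (x+1) (y-1) = v) then 1 else 0)
  + (if pyGet values x (y+1) ≠ v ∧ (pyGet values (x+1) y ≠ v ∨ pyGet values (x+1) (y+1) = v) then 1 else 0)
  + (if pyGet values (x-1) y ≠ v ∧ (pyGet values x (y+1) ≠ v ∨ pyGet values (x-1) (y+1) = v) then 1 else 0)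

lemma price2_eq_sum (plot : List (Int × Int)) (values : List (Int × List (Int × String))) :
    price2 plot values = (plot.length : Int) * (plot.map (cellA values)).sum := by
  unfold price2
  dsimp only
  refine Eq.trans (congrArg _ (PySem.List.foldl_congr_mem _ _ (fun (a : Int) (c : Int × Int) => a + cellA values c) _ ?_)) ?_
  · intro a c _; simp only [cellA]; ring
  · rw [PySem.List.foldl_add, zero_add]

lemma guardRow (row : List (Int × String)) (t : Int) :
    (if (PySem.Dict.mk row).contains t then ((PySem.Dict.mk row).get? t).getD "" else ".")
      = ((PySem.Dict.mk row).get? t).getD "." := by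
  by_cases hb : (PySem.Dict.mk row).contains t = true
  · rw [if_pos hb, PySem.Dict.contains_eq_isSome_get?] at *
    obtain ⟨w, hw⟩ := Option.isSome_iff_exists.mp hb
    simp [hw]
  · rw [if_neg hb]
    rw [PySem.Dict.contains_eq_isSome_get?] at hb
    have : (PySem.Dict.mk row).get? t = none := by
      cases hg : (PySem.Dict.mk row).get? t <;> simp_all
    simp [this]

lemma getD_irrel {o : Option String} (h : o.isSome = true) (a b : String) : o.getD a = o.getD b := by
  cases o <;> simp_all

lemma pyGet_some (values : List (Int × List (Int × String))) (x y : Int) (r : List (Int × String))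
    (hr : (PySem.Dict.mk values).get? y = some r) :
    pyGet values x y = ((PySem.Dict.mk r).get? x).getD "." := by
  simp [pyGet, hr]

lemma pyGet_none (values : List (Int × List (Int × String))) (x y : Int)
    (hr : (PySem.Dict.mk values).get? y = none) : pyGet values x y = "." := by
  unfold pyGet
  rw [hr]
  rfl

-- cells lookup: the insert loop indexes plot by its own cells
lemma cells_get? (plot : List (Int × Int)) (values : List (Int × List (Int × String))) (k : Int × Int) :
    (cellsOf plot values).get? k = if k ∈ plot then some (valRaw values k) else none := by
  unfold cellsOf
  have key : ∀ (t : List (Int × Int)) (d : PySem.Dict (Int × Int) String),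
      (t.foldl (fun d c => d.insert (c.1, c.2)
          (((PySem.Dict.mk (((PySem.Dict.mk values).get? c.2).getD [])).get? c.1).getD "")) d).get? k
        = if k ∈ t then some (valRaw values k) else d.get? k := by
    intro t
    induction t with
    | nil => intro d; simp
    | cons c t ih =>
      intro d
      rw [List.foldl_cons, ih]
      by_cases ht : k ∈ t
      · simp [ht]
      · rw [if_neg ht, PySem.Dict.get?_insert]
        by_cases hk : k = c
        · subst hk; simp [valRaw]
        ·           simp [ht, hk]
  rw [key plot PySem.Dict.empty]
  by_cases h : k ∈ plot <;> simp [h, PySem.Dict.get?_empty]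

lemma cells_contains (plot : List (Int × Int)) (values : List (Int × List (Int × String))) (k : Int × Int) :
    (cellsOf plot values).contains k = decide (k ∈ plot) := by
  rw [PySem.Dict.contains_eq_isSome_get?, cells_get?]
  by_cases h : k ∈ plot <;> simp [h]

lemma cells_getD (plot : List (Int × Int)) (values : List (Int × List (Int × String))) (k : Int × Int)
    (h : k ∈ plot) : (cellsOf plot values).getD k "" = valRaw values k := by
  rw [PySem.Dict.getD_eq_get?_getD, cells_get?]
  simp [h]

-- the flattened edge list the pass-1 loop builds
def edgeList (plot : List (Int × Int)) (values : List (Int × List (Int × String))) :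
    List (Int × Int × Int × Int) :=
  plot.flatMap (fun c =>
    (dirs4.filter (fun dr => pyGet values (c.1 + dr.1) (c.2 + dr.2) ≠ valRaw values c)).map
      (fun dr => (c.1, c.2, dr.1, dr.2)))

lemma cells_items (plot : List (Int × Int)) (values : List (Int × List (Int × String)))
    (hnd : plot.Nodup) :
    (cellsOf plot values).items = plot.map (fun c => ((c.1, c.2), valRaw values c)) := by
  unfold cellsOf
  rw [PySem.Dict.items_foldl_insert_fresh]
  · simp [valRaw, PySem.Dict.empty]
  · intro a _; simp
  · simpa using hnd

-- a conditional-add loop is an update with the filtered mapped list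
lemma foldl_if_add {A B : Type} [BEq B] [LawfulBEq B] (l : List A) (q : A → Prop) [DecidablePred q]
    (f : A → B) (es : PySem.Set B) :
    l.foldl (fun es x => if q x then PySem.Set.add es (f x) else es) es
      = PySem.Set.update es ((l.filter (fun x => decide (q x))).map f) := by
  induction l generalizing es with
  | nil => simp [PySem.Set.update]
  | cons a t ih =>
    by_cases h : q a
    · simp [h, ih, PySem.Set.update_cons]
    · simp [h, ih]

lemma edges_eq (plot : List (Int × Int)) (values : List (Int × List (Int × String)))
    (hnd : plot.Nodup) : edgesOf plot values = edgeList plot values := by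
  unfold edgesOf
  rw [cells_items plot values hnd, List.foldl_map]
  have hbody : (fun (es : PySem.Set (Int × Int × Int × Int)) (c : Int × Int) =>
      dirs4.foldl (fun es dr =>
        if pyGet values (((c.1, c.2), valRaw values c).1.1 + dr.1) (((c.1, c.2), valRaw values c).1.2 + dr.2) ≠ ((c.1, c.2), valRaw values c).2 then
          PySem.Set.add es (((c.1, c.2), valRaw values c).1.1, ((c.1, c.2), valRaw values c).1.2, dr.1, dr.2)
        else es) es)
      = (fun es c => PySem.Set.update es
          (((dirs4.filter (fun dr => decide (pyGet values (c.1 + dr.1) (c.2 + dr.2) ≠ valRaw values c))).map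
            (fun dr => (c.1, c.2, dr.1, dr.2))))) := by
    funext es c
    exact foldl_if_add dirs4 _ _ es
  rw [hbody]
  have hupd : ∀ (l : List (Int × Int)) (es : PySem.Set (Int × Int × Int × Int)),
      l.foldl (fun es c => PySem.Set.update es
        (((dirs4.filter (fun dr => decide (pyGet values (c.1 + dr.1) (c.2 + dr.2) ≠ valRaw values c))).map
          (fun dr => (c.1, c.2, dr.1, dr.2))))) es
      = (l.flatMap (fun c =>
          (dirs4.filter (fun dr => decide (pyGet values (c.1 + dr.1) (c.2 + dr.2) ≠ valRaw values c))).map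
            (fun dr => (c.1, c.2, dr.1, dr.2)))).foldl PySem.Set.add es := by
    intro l es
    rw [List.foldl_flatMap]
    simp [PySem.Set.update]
  rw [hupd]
  rw [show (PySem.Set.empty : PySem.Set (Int × Int × Int × Int)) = ([] : List (Int × Int × Int × Int)) from rfl]
  rw [← PySem.Set.ofList_eq_foldl]
  apply PySem.Set.ofList_eq_self_of_nodup
  rw [List.nodup_flatMap]
  constructor
  · intro c _
    apply List.Nodup.map
    · intro d1 d2 h
      have h1 : d1.1 = d2.1 := congrArg (fun t => t.2.2.1) h
      have h2 : d1.2 = d2.2 := congrArg (fun t => t.2.2.2) h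
      exact Prod.ext h1 h2
    · exact List.Nodup.filter _ (by decide)
  · refine hnd.imp ?_
    intro c c' hne e he1 he2
    obtain ⟨d1, -, h1⟩ := List.mem_map.mp he1
    obtain ⟨d2, -, h2⟩ := List.mem_map.mp he2
    apply hne
    have e1 : c.1 = c'.1 := by
      have := congrArg (fun t => t.1) (h1.trans h2.symm)
      simpa using this
    have e2 : c.2 = c'.2 := by
      have := congrArg (fun t => t.2.1) (h1.trans h2.symm)
      simpa using this
    exact Prod.ext e1 e2

lemma mem_edgeList (plot : List (Int × Int)) (values : List (Int × List (Int × String)))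
    (a b n1 n2 : Int) :
    (a, b, n1, n2) ∈ edgeList plot values ↔
      (a, b) ∈ plot ∧ (n1, n2) ∈ dirs4 ∧ pyGet values (a + n1) (b + n2) ≠ valRaw values (a, b) := by
  unfold edgeList
  simp only [List.mem_flatMap, List.mem_map, List.mem_filter, decide_eq_true_eq]
  constructor
  · rintro ⟨c, hc, dr, ⟨hdm, hdne⟩, heq⟩
    have ea : c.1 = a := by have := congrArg (fun t => t.1) heq; simpa using this
    have eb : c.2 = b := by have := congrArg (fun t => t.2.1) heq; simpa using this
    have e1' : dr.1 = n1 := by have := congrArg (fun t => t.2.2.1) heq; simpa using this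
    have e2' : dr.2 = n2 := by have := congrArg (fun t => t.2.2.2) heq; simpa using this
    have hc' : c = (a, b) := Prod.ext ea eb
    have hdr : dr = (n1, n2) := Prod.ext e1' e2'
    subst hc'; subst hdr
    exact ⟨hc, hdm, hdne⟩
  · rintro ⟨hab, hdm, hdne⟩
    exact ⟨(a, b), hab, (n1, n2), ⟨hdm, hdne⟩, rfl⟩

lemma valRaw_eq_pyGet (values : List (Int × List (Int × String))) (c : Int × Int)
    (h : gridOK_price2 values c.1 c.2) : valRaw values c = pyGet values c.1 c.2 := by
  obtain ⟨h1, h2, -, -⟩ := h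
  rw [PySem.Dict.contains_eq_isSome_get?] at h1
  obtain ⟨r, hr⟩ := Option.isSome_iff_exists.mp h1
  rw [PySem.Dict.contains_eq_isSome_get?] at h2
  rw [pyGet_some values c.1 c.2 r hr]
  unfold valRaw
  rw [hr] at h2 ⊢
  simp only [Option.getD_some] at h2 ⊢
  exact getD_irrel h2 "" "."

-- the pass-2 start indicator as a named function of the edge tuple
def indB (plot : List (Int × Int)) (values : List (Int × List (Int × String)))
    (e : Int × Int × Int × Int) : Int :=
  if (cellsOf plot values).contains (e.1 + e.2.2.2, e.2.1 + -e.2.2.1) = false ∨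
     (cellsOf plot values).getD (e.1 + e.2.2.2, e.2.1 + -e.2.2.1) "" ≠ (cellsOf plot values).getD (e.1, e.2.1) "" ∨
     (e.1 + e.2.2.2, e.2.1 + -e.2.2.1, e.2.2.1, e.2.2.2) ∉ edgeList plot values then 1 else 0

lemma sum_map_flatMap {A B : Type} (l : List A) (g : A → List B) (f : B → Int) :
    ((l.flatMap g).map f).sum = (l.map (fun x => ((g x).map f).sum)).sum := by
  induction l with
  | nil => simp
  | cons a t ih => simp [ih]

lemma filter_map_sum {A : Type} (l : List A) (q : A → Bool) (f : A → Int) :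
    ((l.filter q).map f).sum = (l.map (fun x => if q x then f x else 0)).sum := by
  induction l with
  | nil => simp
  | cons a t ih => by_cases h : q a <;> simp [h, ih]

-- one direction's start term, reduced to a condition on the grid values alone
lemma startTerm (plot : List (Int × Int)) (values : List (Int × List (Int × String)))
    (hgrid : ∀ c ∈ plot, gridOK_price2 values c.1 c.2)
    (hcl : ∀ c ∈ plot, ∀ d ∈ ([(1, 0), (-1, 0), (0, 1), (0, -1)] : List (Int × Int)),
      pyGet values (c.1 + d.1) (c.2 + d.2) = pyGet values c.1 c.2 → (c.1 + d.1, c.2 + d.2) ∈ plot)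
    (c : Int × Int) (hc : c ∈ plot) (dx dy : Int)
    (hdir : (dx, dy) ∈ dirs4)
    (hperp : (dy, -dx) ∈ ([(1, 0), (-1, 0), (0, 1), (0, -1)] : List (Int × Int))) :
    (if pyGet values (c.1 + dx) (c.2 + dy) ≠ valRaw values c then indB plot values (c.1, c.2, dx, dy) else 0)
      = (if pyGet values (c.1 + dx) (c.2 + dy) ≠ pyGet values c.1 c.2 ∧
            (pyGet values (c.1 + dy) (c.2 + -dx) ≠ pyGet values c.1 c.2 ∨
             pyGet values (c.1 + dy + dx) (c.2 + -dx + dy) = pyGet values c.1 c.2) then 1 else 0) := by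
  have hv : valRaw values c = pyGet values c.1 c.2 := valRaw_eq_pyGet values c (hgrid c hc)
  rw [hv]
  by_cases hedge : pyGet values (c.1 + dx) (c.2 + dy) = pyGet values c.1 c.2
  · simp [hedge]
  · rw [if_pos hedge]
    unfold indB
    dsimp only
    have hcc : ((c.1, c.2) : Int × Int) ∈ plot := by simpa using hc
    rw [cells_contains, cells_getD plot values (c.1, c.2) hcc]
    have hvv : valRaw values (c.1, c.2) = pyGet values c.1 c.2 := by
      rw [show ((c.1, c.2) : Int × Int) = c from rfl, hv]
    rw [hvv]
    simp only [mem_edgeList]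
    by_cases hp : ((c.1 + dy, c.2 + -dx) : Int × Int) ∈ plot
    · rw [cells_getD plot values _ hp]
      have hfp : valRaw values (c.1 + dy, c.2 + -dx) = pyGet values (c.1 + dy) (c.2 + -dx) :=
        valRaw_eq_pyGet values _ (hgrid _ hp)
      rw [hfp]
      by_cases hfpv : pyGet values (c.1 + dy) (c.2 + -dx) = pyGet values c.1 c.2
      · by_cases hpn : pyGet values (c.1 + dy + dx) (c.2 + -dx + dy) = pyGet values c.1 c.2
        · simp [hp, hdir, hfpv, hpn, hedge]
        · simp [hp, hdir, hfpv, hpn, hedge]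
      · simp [hp, hfpv, hedge]
    · have hfpv : pyGet values (c.1 + dy) (c.2 + -dx) ≠ pyGet values c.1 c.2 := by
        intro hvv2
        exact hp (hcl c hc (dy, -dx) hperp hvv2)
      simp [hp, hfpv, hedge]

-- the four start terms of one cell sum to its side-start count
lemma cell_count (plot : List (Int × Int)) (values : List (Int × List (Int × String)))
    (hgrid : ∀ c ∈ plot, gridOK_price2 values c.1 c.2)
    (hcl : ∀ c ∈ plot, ∀ d ∈ ([(1, 0), (-1, 0), (0, 1), (0, -1)] : List (Int × Int)),
      pyGet values (c.1 + d.1) (c.2 + d.2) = pyGet values c.1 c.2 → (c.1 + d.1, c.2 + d.2) ∈ plot)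
    (c : Int × Int) (hc : c ∈ plot) :
    (((dirs4.filter (fun dr => decide (pyGet values (c.1 + dr.1) (c.2 + dr.2) ≠ valRaw values c))).map
        (fun dr => ((c.1, c.2, dr.1, dr.2) : Int × Int × Int × Int))).map (indB plot values)).sum
      = cellB values c := by
  rw [List.map_map, filter_map_sum]
  simp only [dirs4, List.map_cons, List.map_nil, List.sum_cons, List.sum_nil, Function.comp,
    decide_eq_true_eq]
  rw [startTerm plot values hgrid hcl c hc 0 (-1) (by decide) (by norm_num),
      startTerm plot values hgrid hcl c hc 1 0 (by decide) (by norm_num),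
      startTerm plot values hgrid hcl c hc 0 1 (by decide) (by norm_num),
      startTerm plot values hgrid hcl c hc (-1) 0 (by decide) (by norm_num)]
  simp only [cellB]
  norm_num [sub_eq_add_neg]
  ring

-- under Pre_, B's staged passes compute exactly the per-cell side-start sum
lemma price2_alt_eq_sum (plot : List (Int × Int)) (values : List (Int × List (Int × String)))
    (hnd : plot.Nodup)
    (hgrid : ∀ c ∈ plot, gridOK_price2 values c.1 c.2)
    (hcl : ∀ c ∈ plot, ∀ d ∈ ([(1, 0), (-1, 0), (0, 1), (0, -1)] : List (Int × Int)),
      pyGet values (c.1 + d.1) (c.2 + d.2) = pyGet values c.1 c.2 → (c.1 + d.1, c.2 + d.2) ∈ plot) :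
    price2_alt plot values = (plot.length : Int) * (plot.map (cellB values)).sum := by
  unfold price2_alt
  dsimp only
  congr 1
  rw [edges_eq plot values hnd]
  refine Eq.trans (PySem.List.foldl_congr_mem _ _ (fun (s : Int) e => s + indB plot values e) _ ?_) ?_
  · intro s e _
    simp only [indB]
  · rw [PySem.List.foldl_add, zero_add]
    unfold edgeList
    rw [sum_map_flatMap]
    refine congrArg _ (List.map_congr_left ?_)
    intro c hc
    exact cell_count plot values hgrid hcl c hc


lemma cellA_decomp (values : List (Int × List (Int × String))) (c : Int × Int)
    (h : gridOK_price2 values c.1 c.2) :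
    cellA values c =
      concI values c.1 c.2 (-1) (-1) + convI values c.1 c.2 (-1) (-1)
      + concI values c.1 c.2 (-1) 1 + convI values c.1 c.2 (-1) 1
      + concI values c.1 c.2 1 (-1) + convI values c.1 c.2 1 (-1)
      + concI values c.1 c.2 1 1 + convI values c.1 c.2 1 1 := by
  obtain ⟨x, y⟩ := c
  obtain ⟨h1, h2, h3, h4⟩ := h
  simp only at h1 h2 h3 h4
  obtain ⟨r, hr⟩ : ∃ r, (PySem.Dict.mk values).get? y = some r := by
    rw [PySem.Dict.contains_eq_isSome_get?] at h1
    exact Option.isSome_iff_exists.mp h1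
  simp only [hr, Option.getD_some] at h2
  rw [PySem.Dict.contains_eq_isSome_get?] at h2
  have hvy : pyGet values x y = ((PySem.Dict.mk r).get? x).getD "." := pyGet_some values _ _ _ hr
  simp only [cellA, convI, concI]
  simp only [show ∀ z : Int, z + -1 = z - 1 from fun z => by ring]
  simp only [hr, Option.getD_some]
  rw [getD_irrel h2 "" "."]
  rw [guardRow r (x - 1), guardRow r (x + 1)]
  have g2 : pyGet values (x - 1) y = ((PySem.Dict.mk r).get? (x - 1)).getD "." := pyGet_some values _ _ _ hr
  have g3 : pyGet values (x + 1) y = ((PySem.Dict.mk r).get? (x + 1)).getD "." := pyGet_some values _ _ _ hr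
  rw [← hvy, ← g2, ← g3]
  by_cases hc1 : (PySem.Dict.mk values).contains (y - 1) = true
  · obtain ⟨r1, hr1⟩ : ∃ r1, (PySem.Dict.mk values).get? (y - 1) = some r1 := by
      rw [PySem.Dict.contains_eq_isSome_get?] at hc1
      exact Option.isSome_iff_exists.mp hc1
    have h3' := h3 hc1
    simp only [hr1, Option.getD_some] at h3' ⊢
    rw [PySem.Dict.contains_eq_isSome_get?] at h3'
    simp only [hc1, if_true, Bool.true_and]
    rw [getD_irrel h3' "" "."]
    rw [guardRow r1 (x - 1), guardRow r1 (x + 1)]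
    have e1 : pyGet values x (y - 1) = ((PySem.Dict.mk r1).get? x).getD "." := pyGet_some values _ _ _ hr1
    have e2 : pyGet values (x - 1) (y - 1) = ((PySem.Dict.mk r1).get? (x - 1)).getD "." := pyGet_some values _ _ _ hr1
    have e3 : pyGet values (x + 1) (y - 1) = ((PySem.Dict.mk r1).get? (x + 1)).getD "." := pyGet_some values _ _ _ hr1
    rw [← e1, ← e2, ← e3]
    by_cases hc2 : (PySem.Dict.mk values).contains (y + 1) = true
    · obtain ⟨r2, hr2⟩ : ∃ r2, (PySem.Dict.mk values).get? (y + 1) = some r2 := by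
        rw [PySem.Dict.contains_eq_isSome_get?] at hc2
        exact Option.isSome_iff_exists.mp hc2
      have h4' := h4 hc2
      simp only [hr2, Option.getD_some] at h4' ⊢
      rw [PySem.Dict.contains_eq_isSome_get?] at h4'
      simp only [hc2, if_true, Bool.true_and]
      rw [getD_irrel h4' "" "."]
      rw [guardRow r2 (x - 1), guardRow r2 (x + 1)]
      have f1 : pyGet values x (y + 1) = ((PySem.Dict.mk r2).get? x).getD "." := pyGet_some values _ _ _ hr2
      have f2 : pyGet values (x - 1) (y + 1) = ((PySem.Dict.mk r2).get? (x - 1)).getD "." := pyGet_some values _ _ _ hr2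
      have f3 : pyGet values (x + 1) (y + 1) = ((PySem.Dict.mk r2).get? (x + 1)).getD "." := pyGet_some values _ _ _ hr2
      rw [← f1, ← f2, ← f3]
    · have hn2 : (PySem.Dict.mk values).get? (y + 1) = none := by
        rw [PySem.Dict.contains_eq_isSome_get?] at hc2
        cases hg : (PySem.Dict.mk values).get? (y + 1) <;> simp_all
      have f1 : pyGet values x (y + 1) = "." := pyGet_none values _ _ hn2
      have f2 : pyGet values (x - 1) (y + 1) = "." := pyGet_none values _ _ hn2
      have f3 : pyGet values (x + 1) (y + 1) = "." := pyGet_none values _ _ hn2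
      simp only [Bool.not_eq_true] at hc2
      simp only [hc2, Bool.false_eq_true, if_false, Bool.false_and, f1, f2, f3]
  · have hn1 : (PySem.Dict.mk values).get? (y - 1) = none := by
      rw [PySem.Dict.contains_eq_isSome_get?] at hc1
      cases hg : (PySem.Dict.mk values).get? (y - 1) <;> simp_all
    have e1 : pyGet values x (y - 1) = "." := pyGet_none values _ _ hn1
    have e2 : pyGet values (x - 1) (y - 1) = "." := pyGet_none values _ _ hn1
    have e3 : pyGet values (x + 1) (y - 1) = "." := pyGet_none values _ _ hn1
    simp only [Bool.not_eq_true] at hc1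
    simp only [hc1, Bool.false_eq_true, if_false, Bool.false_and, e1, e2, e3]
    by_cases hc2 : (PySem.Dict.mk values).contains (y + 1) = true
    · obtain ⟨r2, hr2⟩ : ∃ r2, (PySem.Dict.mk values).get? (y + 1) = some r2 := by
        rw [PySem.Dict.contains_eq_isSome_get?] at hc2
        exact Option.isSome_iff_exists.mp hc2
      have h4' := h4 hc2
      simp only [hr2, Option.getD_some] at h4' ⊢
      rw [PySem.Dict.contains_eq_isSome_get?] at h4'
      simp only [hc2, if_true, Bool.true_and]
      rw [getD_irrel h4' "" "."]
      rw [guardRow r2 (x - 1), guardRow r2 (x + 1)]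
      have f1 : pyGet values x (y + 1) = ((PySem.Dict.mk r2).get? x).getD "." := pyGet_some values _ _ _ hr2
      have f2 : pyGet values (x - 1) (y + 1) = ((PySem.Dict.mk r2).get? (x - 1)).getD "." := pyGet_some values _ _ _ hr2
      have f3 : pyGet values (x + 1) (y + 1) = ((PySem.Dict.mk r2).get? (x + 1)).getD "." := pyGet_some values _ _ _ hr2
      rw [← f1, ← f2, ← f3]
    · have hn2 : (PySem.Dict.mk values).get? (y + 1) = none := by
        rw [PySem.Dict.contains_eq_isSome_get?] at hc2
        cases hg : (PySem.Dict.mk values).get? (y + 1) <;> simp_all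
      have f1 : pyGet values x (y + 1) = "." := pyGet_none values _ _ hn2
      have f2 : pyGet values (x - 1) (y + 1) = "." := pyGet_none values _ _ hn2
      have f3 : pyGet values (x + 1) (y + 1) = "." := pyGet_none values _ _ hn2
      simp only [Bool.not_eq_true] at hc2
      simp only [hc2, Bool.false_eq_true, if_false, Bool.false_and, f1, f2, f3]

lemma startSplitA (v n p pn : String) :
    (if n ≠ v ∧ (p ≠ v ∨ pn = v) then (1:Int) else 0)
      = (if n ≠ v ∧ p ≠ v then 1 else 0) + (if n ≠ v ∧ p = v ∧ pn = v then 1 else 0) := by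
  by_cases h1 : n = v <;> by_cases h2 : p = v <;> by_cases h3 : pn = v <;> simp [h1, h2, h3]

lemma startSplitB (v n p pn : String) :
    (if n ≠ v ∧ (p ≠ v ∨ pn = v) then (1:Int) else 0)
      = (if p ≠ v ∧ n ≠ v then 1 else 0) + (if n ≠ v ∧ p = v ∧ pn = v then 1 else 0) := by
  by_cases h1 : n = v <;> by_cases h2 : p = v <;> by_cases h3 : pn = v <;> simp [h1, h2, h3]

lemma cellB_decomp (values : List (Int × List (Int × String))) (c : Int × Int) :
    cellB values c =
      (convI values c.1 c.2 (-1) (-1) + contI values c.1 c.2 0 (-1) (-1) 0)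
      + (convI values c.1 c.2 1 (-1) + contI values c.1 c.2 1 0 0 (-1))
      + (convI values c.1 c.2 1 1 + contI values c.1 c.2 0 1 1 0)
      + (convI values c.1 c.2 (-1) 1 + contI values c.1 c.2 (-1) 0 0 1) := by
  obtain ⟨x, y⟩ := c
  simp only [cellB, convI, contI]
  norm_num [sub_eq_add_neg]
  rw [startSplitA (pyGet values x y) (pyGet values x (y + -1)) (pyGet values (x + -1) y) (pyGet values (x + -1) (y + -1))]
  rw [startSplitB (pyGet values x y) (pyGet values (x + 1) y) (pyGet values x (y + -1)) (pyGet values (x + 1) (y + -1))]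
  rw [startSplitA (pyGet values x y) (pyGet values x (y + 1)) (pyGet values (x + 1) y) (pyGet values (x + 1) (y + 1))]
  rw [startSplitB (pyGet values x y) (pyGet values (x + -1) y) (pyGet values x (y + 1)) (pyGet values (x + -1) (y + 1))]

-- the shift bijection: edge continuations in direction p are exactly the concave corners
-- of type n − p of the neighbouring cell, provided the plot is closed under same-value
-- adjacency in directions p and −p
lemma cont_sum_eq_conc_sum (vals : List (Int × List (Int × String))) (S : Finset (Int × Int))
    (nx ny px py : Int)
    (hax : nx = 0 ∧ py = 0 ∨ ny = 0 ∧ px = 0)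
    (hp : ∀ c ∈ S, pyGet vals (c.1 + px) (c.2 + py) = pyGet vals c.1 c.2 → (c.1 + px, c.2 + py) ∈ S)
    (hm : ∀ c ∈ S, pyGet vals (c.1 - px) (c.2 - py) = pyGet vals c.1 c.2 → (c.1 - px, c.2 - py) ∈ S) :
    (∑ c ∈ S, contI vals c.1 c.2 nx ny px py) = ∑ c ∈ S, concI vals c.1 c.2 (nx - px) (ny - py) := by
  classical
  have hP : (∑ c ∈ S, contI vals c.1 c.2 nx ny px py)
      = ((S.filter (fun c => pyGet vals (c.1 + nx) (c.2 + ny) ≠ pyGet vals c.1 c.2 ∧ pyGet vals (c.1 + px) (c.2 + py) = pyGet vals c.1 c.2 ∧ pyGet vals (c.1 + px + nx) (c.2 + py + ny) = pyGet vals c.1 c.2)).card : Int) := by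
    simp [contI, Finset.sum_boole]
  have hQ : (∑ c ∈ S, concI vals c.1 c.2 (nx - px) (ny - py))
      = ((S.filter (fun c => pyGet vals (c.1 + (nx - px)) (c.2 + (ny - py)) ≠ pyGet vals c.1 c.2 ∧ pyGet vals c.1 (c.2 + (ny - py)) = pyGet vals c.1 c.2 ∧ pyGet vals (c.1 + (nx - px)) c.2 = pyGet vals c.1 c.2)).card : Int) := by
    simp [concI, Finset.sum_boole]
  rw [hP, hQ]
  congr 1
  apply Finset.card_nbij' (i := fun c => (c.1 + px, c.2 + py)) (j := fun c => (c.1 - px, c.2 - py))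
  · intro c hc
    rw [Finset.mem_coe, Finset.mem_filter] at *
    obtain ⟨hcS, hn, hp2, hpn⟩ := hc
    rcases hax with ⟨h0, h0'⟩ | ⟨h0, h0'⟩ <;> subst h0 <;> subst h0' <;>
      simp only [add_zero, zero_add, neg_zero, sub_eq_add_neg,
        add_neg_cancel_right] at hp hm hn hp2 hpn ⊢
    · exact ⟨hp c hcS hp2, by rw [hp2]; exact hn, by rw [hp2]; exact hpn, by rw [hp2]⟩
    · exact ⟨hp c hcS hp2, by rw [hp2]; exact hn, by rw [hp2], by rw [hp2]; exact hpn⟩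
  · intro c hc
    rw [Finset.mem_coe, Finset.mem_filter] at *
    obtain ⟨hcS, q1, q2, q3⟩ := hc
    rcases hax with ⟨h0, h0'⟩ | ⟨h0, h0'⟩ <;> subst h0 <;> subst h0' <;>
      simp only [add_zero, zero_add, neg_zero, sub_eq_add_neg,
        neg_add_cancel_right] at hp hm q1 q2 q3 ⊢
    · exact ⟨hm c hcS q3, by rw [q3]; exact q1, by rw [q3], by rw [q3]; exact q2⟩
    · exact ⟨hm c hcS q2, by rw [q2]; exact q1, by rw [q2], by rw [q2]; exact q3⟩
  · intro c hc
    ext : 1 <;> dsimp <;> ring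
  · intro c hc
    ext : 1 <;> dsimp <;> ring

-- ===== VERDICT (by name: the statement is the Claim_ definition above) =====
theorem price2_spec : Claim_equal_price2 := by
  unfold Claim_equal_price2
  intro plot values _ hpre
  obtain ⟨hnd, hgrid, hcl⟩ := hpre
  unfold Spec_price2
  rw [price2_eq_sum, price2_alt_eq_sum plot values hnd hgrid hcl]
  congr 1
  rw [← List.sum_toFinset _ hnd, ← List.sum_toFinset _ hnd]
  rw [Finset.sum_congr rfl (fun c hc => cellA_decomp values c (hgrid c (List.mem_toFinset.mp hc)))]
  rw [Finset.sum_congr rfl (fun c _ => cellB_decomp values c)]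
  have hdir : ∀ dx dy : Int, ((dx, dy) ∈ ([(1, 0), (-1, 0), (0, 1), (0, -1)] : List (Int × Int))) →
      ∀ c ∈ plot.toFinset, pyGet values (c.1 + dx) (c.2 + dy) = pyGet values c.1 c.2 →
        (c.1 + dx, c.2 + dy) ∈ plot.toFinset := by
    intro dx dy hdm c hc heq
    exact List.mem_toFinset.mpr (hcl c (List.mem_toFinset.mp hc) (dx, dy) hdm heq)
  have hup := cont_sum_eq_conc_sum values plot.toFinset 0 (-1) (-1) 0 (Or.inl ⟨rfl, rfl⟩)
    (hdir (-1) 0 (by simp)) (by simpa using hdir 1 0 (by simp))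
  have hrt := cont_sum_eq_conc_sum values plot.toFinset 1 0 0 (-1) (Or.inr ⟨rfl, rfl⟩)
    (hdir 0 (-1) (by simp)) (by simpa using hdir 0 1 (by simp))
  have hdn := cont_sum_eq_conc_sum values plot.toFinset 0 1 1 0 (Or.inl ⟨rfl, rfl⟩)
    (hdir 1 0 (by simp)) (by simpa using hdir (-1) 0 (by simp))
  have hlt := cont_sum_eq_conc_sum values plot.toFinset (-1) 0 0 1 (Or.inr ⟨rfl, rfl⟩)
    (hdir 0 1 (by simp)) (by simpa using hdir 0 (-1) (by simp))
  simp only [Finset.sum_add_distrib, hup, hrt, hdn, hlt]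
  norm_num
  ring
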